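-- pv_equiv track=rewrite | github.com/inaguu/comp8005-assign4 | source/worker.py | gen_pass
-- ===== SOURCE A (Python) =====
-- def gen_pass(val: int, search_space: str) -> str:
--     n = len(search_space)
--     size = 1
--     block = n
--     while val >= block:
--         val -= block
--         size += 1
--         block *= n
--     chars = [""] * size
--     for i in range(size - 1, -1, -1):
--         chars[i] = search_space[val % n]
--         val //= n
--     return "".join(chars)
-- ===== SOURCE B (Python) =====
-- def gen_pass(val: int, search_space: str) -> str:
--     n = len(search_space)
--     out = []
--     m = val + 1
--     while m > 0:
--         m -= 1
--         out.append(search_space[m % n])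
--         m //= n
--     return "".join(reversed(out))
-- ===== Notes on version B (the rewrite author's own statement) =====
-- stated objective: simpler
-- what changed: Replaced A's two-pass scheme (size-finding block-subtraction loop followed by a fixed-length digit-filling loop) with one bijective base-n loop: m = val+1; while m > 0: m -= 1; emit search_space[m % n]; m //= n; reverse at the end.
-- outside the precondition, e.g. on gen_pass(-3, 'ab'): A returns 'b', B returns ''; on gen_pass(0, ''): A does not finish within the time limit, B raises ZeroDivisionError
import Mathlib
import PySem

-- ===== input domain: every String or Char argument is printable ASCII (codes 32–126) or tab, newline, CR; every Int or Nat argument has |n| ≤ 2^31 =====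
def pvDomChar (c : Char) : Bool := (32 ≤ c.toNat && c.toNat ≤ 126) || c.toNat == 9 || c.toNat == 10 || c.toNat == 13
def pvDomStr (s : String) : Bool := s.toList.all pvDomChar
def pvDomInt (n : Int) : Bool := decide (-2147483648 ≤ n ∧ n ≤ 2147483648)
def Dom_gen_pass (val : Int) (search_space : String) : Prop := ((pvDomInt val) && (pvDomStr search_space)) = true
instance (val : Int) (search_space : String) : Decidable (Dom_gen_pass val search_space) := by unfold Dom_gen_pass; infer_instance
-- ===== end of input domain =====

-- B replaces A's two-pass scheme (size-finding loop, then fixed-length digit loop) with the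
-- single-loop bijective base-n conversion (m = val+1; decrement, emit, floor-divide; reverse);
-- objective: simpler.

-- ===== PORT A =====
-- while val >= block: val -= block; size += 1; block *= n   (fuel = val.toNat+1 is a totality
-- guard only; the loop runs at most val.toNat times when n ≥ 1, and diverges in Python for n = 0,
-- which Pre_ excludes)
def gen_pass_loop (n : Int) : Nat → Int → Nat → Int → Int × Nat
  | 0, val, size, _ => (val, size)
  | f + 1, val, size, block =>
    if block ≤ val then gen_pass_loop n f (val - block) (size + 1) (block * n)
    else (val, size)

-- for i in range(size-1, -1, -1): chars[i] = search_space[val % n]; val //= n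
-- (fills the list right-to-left; the structural recursion builds the same list)
def gen_pass_digits (cs : List Char) (n : Int) : Nat → Int → List Char
  | 0, _ => []
  | k + 1, val =>
    gen_pass_digits cs n k (PySem.Int.floordiv val n)
      ++ [(PySem.List.pyGet? cs (PySem.Int.mod val n)).getD ' ']

def gen_pass (val : Int) (search_space : String) : String :=
  let cs := search_space.toList
  let n : Int := (cs.length : Int)
  let p := gen_pass_loop n (val.toNat + 1) val 1 n
  String.mk (gen_pass_digits cs n p.2 p.1)

-- ===== PORT B =====
-- while m > 0: m -= 1; out.append(search_space[m % n]); m //= n   (fuel = (val+1).toNat is a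
-- totality guard only: when n ≥ 1 the loop runs at most (val+1).toNat times)
def gen_pass_alt_loop (cs : List Char) (n : Int) : Nat → Int → List Char → List Char
  | 0, _, out => out
  | f + 1, m, out =>
    if 0 < m then
      gen_pass_alt_loop cs n f (PySem.Int.floordiv (m - 1) n)
        (out ++ [(PySem.List.pyGet? cs (PySem.Int.mod (m - 1) n)).getD ' '])
    else out

def gen_pass_alt (val : Int) (search_space : String) : String :=
  let cs := search_space.toList
  let n : Int := (cs.length : Int)
  String.mk (gen_pass_alt_loop cs n (val + 1).toNat (val + 1) []).reverse

-- ===== PRECONDITION & SPEC =====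
-- Pre_ excludes negative val — outside the natural domain of an enumeration index, where A's
-- value is an artefact of Python's negative-modulo wraparound — and an empty search_space, on
-- which A diverges (val ≥ 0) or raises ZeroDivisionError (val < 0).
def Pre_gen_pass (val : Int) (search_space : String) : Prop :=
  0 ≤ val ∧ search_space.toList ≠ []
instance (val : Int) (search_space : String) : Decidable (Pre_gen_pass val search_space) := by
  unfold Pre_gen_pass; infer_instance

def pvWitness_gen_pass : Int × String := (5, "ab")

def Spec_gen_pass (val : Int) (search_space : String) (out : String) : Prop :=
  out = gen_pass_alt val search_space
instance (val : Int) (search_space : String) (out : String) : Decidable (Spec_gen_pass val search_space out) := by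
  unfold Spec_gen_pass; infer_instance

-- ===== CLAIM (what is proved, stated in full; the proofs are below) =====
def Claim_equal_gen_pass : Prop := ∀ (val : Int) (search_space : String), Dom_gen_pass val search_space → Pre_gen_pass val search_space → Spec_gen_pass val search_space (gen_pass val search_space)

-- ===== LEMMAS AND PROOFS =====

-- A's size loop ignores extra fuel: any fuel ≥ val.toNat suffices when n, block ≥ 1.
theorem gen_pass_loop_fuel (n : Int) (hn : 1 ≤ n) :
    ∀ (f f' : Nat) (val : Int) (size : Nat) (block : Int), 1 ≤ block →
      val.toNat ≤ f → val.toNat ≤ f' →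
      gen_pass_loop n f val size block = gen_pass_loop n f' val size block := by
  intro f
  induction f with
  | zero =>
    intro f' val size block hb hf hf'
    cases f' with
    | zero => rfl
    | succ f' =>
      simp only [gen_pass_loop]
      have : ¬ block ≤ val := by omega
      simp [this]
  | succ f ih =>
    intro f' val size block hb hf hf'
    cases f' with
    | zero =>
      simp only [gen_pass_loop]
      have : ¬ block ≤ val := by omega
      simp [this]
    | succ f' =>
      simp only [gen_pass_loop]
      by_cases h : block ≤ val
      · simp only [h, if_true]
        have hbn : 1 ≤ block * n := by nlinarith
        exact ih f' (val - block) (size + 1) (block * n) hbn (by omega) (by omega)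
      · simp [h]

-- Simulation: scaling the state by n (val ↦ n*val + c, block ↦ n*block) runs the size loop in
-- lockstep, adding one to the resulting size and scaling the residual back.
theorem gen_pass_loop_sim (n : Int) (hn : 1 ≤ n) :
    ∀ (f : Nat) (u : Int) (size : Nat) (b c : Int), 0 ≤ c → c < n →
      gen_pass_loop n f (n * u + c) (size + 1) (n * b)
        = (n * (gen_pass_loop n f u size b).1 + c, (gen_pass_loop n f u size b).2 + 1) := by
  intro f
  induction f with
  | zero => intro u size b c hc hcn; rfl
  | succ f ih =>
    intro u size b c hc hcn
    have hcond : n * b ≤ n * u + c ↔ b ≤ u := by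
      constructor
      · intro h
        by_contra hub
        rw [not_le] at hub
        have : u + 1 ≤ b := hub
        nlinarith
      · intro h; nlinarith
    simp only [gen_pass_loop]
    by_cases h : b ≤ u
    · have h1 : n * b ≤ n * u + c := hcond.mpr h
      simp only [h1, if_true, h, if_true]
      have e1 : n * u + c - n * b = n * (u - b) + c := by ring
      have e2 : n * b * n = n * (b * n) := by ring
      rw [e1, e2, ih (u - b) (size + 1) (b * n) c hc hcn]
    · have h1 : ¬ n * b ≤ n * u + c := fun hh => h (hcond.mp hh)
      simp [h1, h]

-- B's loop appends to its accumulator: the accumulator factors out.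
theorem gen_pass_alt_loop_acc (cs : List Char) (n : Int) :
    ∀ (f : Nat) (m : Int) (out : List Char),
      gen_pass_alt_loop cs n f m out = out ++ gen_pass_alt_loop cs n f m [] := by
  intro f
  induction f with
  | zero => intro m out; simp [gen_pass_alt_loop]
  | succ f ih =>
    intro m out
    simp only [gen_pass_alt_loop]
    by_cases h : 0 < m
    · simp only [h, if_true]
      rw [ih _ (out ++ _), ih _ ([] ++ _)]
      simp
    · simp [h]

-- B's loop ignores extra fuel: any fuel ≥ m.toNat suffices when n ≥ 1.
theorem gen_pass_alt_loop_fuel (cs : List Char) (n : Int) (hn : 1 ≤ n) :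
    ∀ (f f' : Nat) (m : Int) (out : List Char), m.toNat ≤ f → m.toNat ≤ f' →
      gen_pass_alt_loop cs n f m out = gen_pass_alt_loop cs n f' m out := by
  intro f
  induction f with
  | zero =>
    intro f' m out hf hf'
    cases f' with
    | zero => rfl
    | succ f' =>
      simp only [gen_pass_alt_loop]
      have : ¬ 0 < m := by omega
      simp [this]
  | succ f ih =>
    intro f' m out hf hf'
    cases f' with
    | zero =>
      simp only [gen_pass_alt_loop]
      have : ¬ 0 < m := by omega
      simp [this]
    | succ f' =>
      simp only [gen_pass_alt_loop]
      by_cases h : 0 < m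
      · simp only [h, if_true]
        have hm1 : (0:Int) ≤ m - 1 := by omega
        have hdle : PySem.Int.floordiv (m - 1) n ≤ m - 1 := by
          rw [PySem.Int.floordiv_eq_ediv_of_pos (by omega)]
          exact Int.ediv_le_self _ hm1
        have hdnn : 0 ≤ PySem.Int.floordiv (m - 1) n := by
          rw [PySem.Int.floordiv_eq_ediv_of_pos (by omega)]
          exact Int.ediv_nonneg hm1 (by omega)
        exact ih f' _ _ (by omega) (by omega)
      · simp [h]

-- Main equivalence on the character-list level, by strong induction on val.
theorem gen_pass_main (cs : List Char) (hcs : cs ≠ []) :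
    ∀ (N : Nat) (val : Int), 0 ≤ val → val.toNat ≤ N →
      gen_pass_digits cs (cs.length : Int)
          (gen_pass_loop (cs.length : Int) (val.toNat + 1) val 1 (cs.length : Int)).2
          (gen_pass_loop (cs.length : Int) (val.toNat + 1) val 1 (cs.length : Int)).1
        = (gen_pass_alt_loop cs (cs.length : Int) (val + 1).toNat (val + 1) []).reverse := by
  have hn : (1:Int) ≤ (cs.length : Int) := by
    have : cs.length ≠ 0 := fun h => hcs (List.eq_nil_of_length_eq_zero h)
    omega
  set n : Int := (cs.length : Int) with hn_def
  intro N
  induction N with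
  | zero =>
    intro val hv hvN
    have hval0 : val = 0 := by omega
    subst hval0
    have hnotle : ¬ n ≤ (0:Int) := by omega
    have hmod : PySem.Int.mod (0:Int) n = 0 := by
      rw [PySem.Int.mod_eq_emod_of_pos (by omega)]; simp
    have hdiv : PySem.Int.floordiv (0:Int) n = 0 := by
      rw [PySem.Int.floordiv_eq_ediv_of_pos (by omega)]; simp
    simp [gen_pass_loop, gen_pass_alt_loop, gen_pass_digits, hmod, hnotle]
  | succ N ih =>
    intro val hv hvN
    by_cases hsmall : val < n
    · -- one digit on both sides
      have hnotle : ¬ n ≤ val := by omega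
      have hmod : PySem.Int.mod val n = val := by
        rw [PySem.Int.mod_eq_emod_of_pos (by omega)]
        exact Int.emod_eq_of_lt hv hsmall
      have hdiv : PySem.Int.floordiv val n = 0 := by
        rw [PySem.Int.floordiv_eq_ediv_of_pos (by omega)]
        exact Int.ediv_eq_zero_of_lt hv hsmall
      have hf : (val + 1).toNat = val.toNat + 1 := by omega
      rw [hf]
      simp only [gen_pass_loop, hnotle, if_false]
      simp only [gen_pass_alt_loop]
      have hpos : (0:Int) < val + 1 := by omega
      simp only [hpos, if_true]
      have e1 : val + 1 - 1 = val := by ring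
      rw [e1, hdiv]
      have hloop0 : ∀ f out, gen_pass_alt_loop cs n f 0 out = out := by
        intro f out; cases f <;> simp [gen_pass_alt_loop]
      rw [hloop0]
      simp [gen_pass_digits, hmod]
    · -- val ≥ n : peel the last digit off both sides
      rw [not_lt] at hsmall
      set q : Int := PySem.Int.floordiv val n with hq_def
      set c : Int := PySem.Int.mod val n with hc_def
      have hcb : 0 ≤ c ∧ c < n :=
        ⟨PySem.Int.mod_nonneg val (by omega), PySem.Int.mod_lt val (by omega)⟩
      have hqc : q * n + c = val := PySem.Int.floordiv_mul_add_mod val n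
      have hq1 : 1 ≤ q := by nlinarith [hcb.1, hcb.2]
      have hqval : q ≤ val := by nlinarith
      -- ---------- A side ----------
      have hle : n ≤ val := hsmall
      have stepA : gen_pass_loop n (val.toNat + 1) val 1 n
          = gen_pass_loop n val.toNat (val - n) 2 (n * n) := by
        simp only [gen_pass_loop, hle, if_true]
      have hsplit : val - n = n * (q - 1) + c := by linear_combination - hqc
      have simA : gen_pass_loop n val.toNat (val - n) 2 (n * n)
          = (n * (gen_pass_loop n val.toNat (q - 1) 1 n).1 + c,
             (gen_pass_loop n val.toNat (q - 1) 1 n).2 + 1) := by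
        rw [hsplit]
        have hnn : n * n = n * n := rfl
        have := gen_pass_loop_sim n hn val.toNat (q - 1) 1 n c hcb.1 hcb.2
        simpa using this
      have hfuelA : gen_pass_loop n val.toNat (q - 1) 1 n
          = gen_pass_loop n ((q - 1).toNat + 1) (q - 1) 1 n :=
        gen_pass_loop_fuel n hn val.toNat ((q - 1).toNat + 1) (q - 1) 1 n hn (by omega) (by omega)
      -- digit extraction laws for n*r + c
      have hdivrc : ∀ r : Int, PySem.Int.floordiv (n * r + c) n = r := by
        intro r
        rw [PySem.Int.floordiv_eq_ediv_of_pos (by omega)]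
        have : n * r + c = c + n * r := by ring
        rw [this, Int.add_mul_ediv_left c r (by omega : n ≠ 0),
          Int.ediv_eq_zero_of_lt hcb.1 hcb.2]
        ring
      have hmodrc : ∀ r : Int, PySem.Int.mod (n * r + c) n = c := by
        intro r
        rw [PySem.Int.mod_eq_emod_of_pos (by omega)]
        have e : n * r + c = c + r * n := by ring
        rw [e, Int.add_mul_emod_self_right]
        exact Int.emod_eq_of_lt hcb.1 hcb.2
      -- ---------- B side ----------
      have hposm : (0:Int) < val + 1 := by omega
      have e1 : val + 1 - 1 = val := by ring
      have hfB : (val + 1).toNat = val.toNat + 1 := by omega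
      have stepB : gen_pass_alt_loop cs n (val + 1).toNat (val + 1) []
          = [(PySem.List.pyGet? cs c).getD ' ']
              ++ gen_pass_alt_loop cs n val.toNat q [] := by
        rw [hfB]
        simp only [gen_pass_alt_loop, hposm, if_true]
        rw [e1]
        rw [gen_pass_alt_loop_acc]
        simp [hq_def, hc_def]
      have hfuelB : gen_pass_alt_loop cs n val.toNat q []
          = gen_pass_alt_loop cs n ((q - 1) + 1).toNat ((q - 1) + 1) [] := by
        have e2 : q - 1 + 1 = q := by ring
        rw [e2]
        exact gen_pass_alt_loop_fuel cs n hn val.toNat q.toNat q [] (by omega) (by omega)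
      -- ---------- combine ----------
      have hIH := ih (q - 1) (by omega) (by omega)
      rw [stepA, simA, hfuelA, stepB, hfuelB]
      simp only [gen_pass_digits]
      rw [hdivrc, hmodrc, hIH]
      simp

-- ===== VERDICT (by name: the statement is the Claim_ definition above) =====
theorem gen_pass_spec : Claim_equal_gen_pass := by
  intro val search_space _hdom hpre
  obtain ⟨hv, hcs⟩ := hpre
  unfold Spec_gen_pass gen_pass gen_pass_alt
  have := gen_pass_main search_space.toList hcs val.toNat val hv (le_refl _)
  simp only []
  exact congrArg String.mk this
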